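-- pv_equiv track=rewrite | github.com/kgladstone/immaculate_grid_mlb_analysis | src/app/tabs/simulator_tab.py | _build_grid_counts
-- ===== SOURCE A (Python) =====
-- def _count_players_with_all(player_sets: list[set[str]], required_franchids: set[str]) -> int:
--     return sum(1 for s in player_sets if required_franchids.issubset(s))
--
-- def _build_grid_counts(
--     row_codes: list[str],
--     col_codes: list[str],
--     player_sets: list[set[str]],
-- ) -> list[list[int]]:
--     return [
--         [_count_players_with_all(player_sets, {r, c}) for c in col_codes]
--         for r in row_codes
--     ]
-- ===== SOURCE B (Python) =====
-- def _build_grid_counts(row_codes, col_codes, player_sets):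
--     # Bitmask index: one pass over players builds per-code bitmasks; each cell is a popcount.
--     masks = {}
--     for i, s in enumerate(player_sets):
--         bit = 1 << i
--         for code in s:
--             masks[code] = masks.get(code, 0) | bit
--     col_masks = [masks.get(c, 0) for c in col_codes]
--     return [[(masks.get(r, 0) & cm).bit_count() for cm in col_masks] for r in row_codes]
-- ===== Notes on version B (the rewrite author's own statement) =====
-- stated objective: faster
-- what changed: Instead of testing {r,c}.issubset(s) over all players for every cell, B builds per-code player bitmasks in one pass over the players and computes each cell as popcount(mask_r & mask_c).
import Mathlib
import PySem

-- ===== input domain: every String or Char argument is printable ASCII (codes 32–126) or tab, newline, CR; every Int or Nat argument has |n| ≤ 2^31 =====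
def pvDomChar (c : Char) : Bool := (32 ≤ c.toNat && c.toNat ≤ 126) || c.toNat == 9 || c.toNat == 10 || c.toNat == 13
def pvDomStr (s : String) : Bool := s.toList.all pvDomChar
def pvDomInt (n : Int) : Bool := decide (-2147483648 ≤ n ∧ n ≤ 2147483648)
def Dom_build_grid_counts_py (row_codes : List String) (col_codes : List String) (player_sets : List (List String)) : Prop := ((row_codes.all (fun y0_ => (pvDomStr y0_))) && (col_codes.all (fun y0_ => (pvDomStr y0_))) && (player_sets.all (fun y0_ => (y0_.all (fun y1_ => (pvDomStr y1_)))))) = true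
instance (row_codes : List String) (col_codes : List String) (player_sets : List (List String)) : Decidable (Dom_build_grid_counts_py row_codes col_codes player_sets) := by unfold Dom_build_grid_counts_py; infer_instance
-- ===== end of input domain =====

-- B replaces A's per-cell subset scan over all players by per-code player bitmasks
-- built in one pass; each cell is popcount(mask_r & mask_c). (objective: faster)

-- ===== PORT A =====
-- port of _count_players_with_all: sum(1 for s in player_sets if required.issubset(s))
def count_players_with_all_py (player_sets : List (List String)) (required_franchids : PySem.Set String) : Int :=
  player_sets.foldl (fun acc s => if PySem.Set.issubset required_franchids s then acc + 1 else acc) 0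

def build_grid_counts_py (row_codes : List String) (col_codes : List String) (player_sets : List (List String)) : List (List Int) :=
  row_codes.map (fun r => col_codes.map (fun c => count_players_with_all_py player_sets (PySem.Set.ofList [r, c])))

-- ===== PORT B =====
-- pyPopcount n = n.bit_count() (Python's int.bit_count on a nonnegative int)
def pyPopcount (n : Nat) : Nat :=
  if n = 0 then 0 else n % 2 + pyPopcount (n / 2)
decreasing_by exact Nat.div_lt_self (Nat.pos_of_ne_zero (by assumption)) one_lt_two

-- B's first loop: for i, s in enumerate(player_sets): for code in s: masks[code] = masks.get(code, 0) | (1 << i)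
def pvBuildMasks (player_sets : List (List String)) : PySem.Dict String Nat :=
  (PySem.List.enumerate player_sets).foldl
    (fun d p => p.2.foldl (fun d code => d.modify code 0 (· ||| (1 <<< p.1.toNat))) d)
    PySem.Dict.empty

def build_grid_counts_py_alt (row_codes : List String) (col_codes : List String) (player_sets : List (List String)) : List (List Int) :=
  let masks := pvBuildMasks player_sets
  let col_masks := col_codes.map (fun c => masks.getD c 0)
  row_codes.map (fun r => col_masks.map (fun cm => (pyPopcount (masks.getD r 0 &&& cm) : Int)))

-- ===== PRECONDITION & SPEC =====
def Spec_build_grid_counts_py (row_codes : List String) (col_codes : List String) (player_sets : List (List String)) (out : List (List Int)) : Prop := out = build_grid_counts_py_alt row_codes col_codes player_sets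
instance (row_codes : List String) (col_codes : List String) (player_sets : List (List String)) (out : List (List Int)) : Decidable (Spec_build_grid_counts_py row_codes col_codes player_sets out) := by unfold Spec_build_grid_counts_py; infer_instance

-- ===== CLAIM (what is proved, stated in full; the proofs are below) =====
def Claim_equal_build_grid_counts_py : Prop := ∀ (row_codes : List String) (col_codes : List String) (player_sets : List (List String)), Dom_build_grid_counts_py row_codes col_codes player_sets → Spec_build_grid_counts_py row_codes col_codes player_sets (build_grid_counts_py row_codes col_codes player_sets)

-- ===== LEMMAS AND PROOFS =====

-- mask of the players (low bit = first player) whose set contains `code`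
def pvMaskLow (code : String) : List (List String) → Nat
  | [] => 0
  | s :: rest => Nat.bit (decide (code ∈ s)) (pvMaskLow code rest)

theorem pyPopcount_zero : pyPopcount 0 = 0 := by simp [pyPopcount]

theorem pyPopcount_bit (b : Bool) (m : Nat) :
    pyPopcount (Nat.bit b m) = b.toNat + pyPopcount m := by
  by_cases h : Nat.bit b m = 0
  · have hb : b = false := by cases b <;> simp [Nat.bit_val] at h ⊢
    have hm : m = 0 := by cases b <;> simp [Nat.bit_val] at h <;> omega
    simp [hb, hm, pyPopcount_zero]
  · rw [pyPopcount, if_neg h, Nat.bit_mod_two, Nat.bit_div_two]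

theorem pyPopcount_land_maskLow (r c : String) (ps : List (List String)) :
    pyPopcount (pvMaskLow r ps &&& pvMaskLow c ps)
      = ps.countP (fun s => decide (r ∈ s) && decide (c ∈ s)) := by
  induction ps with
  | nil => simp [pvMaskLow, pyPopcount_zero]
  | cons s rest ih =>
      rw [List.countP_cons]
      show pyPopcount (Nat.bit (decide (r ∈ s)) (pvMaskLow r rest) &&&
            Nat.bit (decide (c ∈ s)) (pvMaskLow c rest)) = _
      rw [Nat.land_bit, pyPopcount_bit, ih]
      cases hr : decide (r ∈ s) <;> cases hc : decide (c ∈ s) <;> simp <;> omega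

theorem two_mul_lor (a b : Nat) : 2 * a ||| 2 * b = 2 * (a ||| b) := by
  have := Nat.lor_bit false a false b
  simpa [Nat.bit_val] using this

theorem pow_mul_lor (i a b : Nat) : 2 ^ i * a ||| 2 ^ i * b = 2 ^ i * (a ||| b) := by
  induction i generalizing a b with
  | zero => simp
  | succ k ih =>
      have h : (2 : Nat) ^ (k + 1) = 2 ^ k * 2 := by ring
      rw [h]
      calc 2 ^ k * 2 * a ||| 2 ^ k * 2 * b
          = 2 ^ k * (2 * a) ||| 2 ^ k * (2 * b) := by ring_nf
        _ = 2 ^ k * (2 * a ||| 2 * b) := ih _ _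
        _ = 2 ^ k * (2 * (a ||| b)) := by rw [two_mul_lor]
        _ = 2 ^ k * 2 * (a ||| b) := by ring

theorem one_lor_two_mul (m : Nat) : 1 ||| 2 * m = 2 * m + 1 := by
  have := Nat.lor_bit true 0 false m
  simpa [Nat.bit_val] using this

-- the inner loop over one player's codes
theorem inner_fold_getD (code : String) (bit : Nat) (s : List String) :
    ∀ d : PySem.Dict String Nat,
      (s.foldl (fun d c => d.modify c 0 (· ||| bit)) d).getD code 0
        = if code ∈ s then d.getD code 0 ||| bit else d.getD code 0 := by
  induction s with
  | nil => intro d; simp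
  | cons c s' ih =>
      intro d
      rw [List.foldl_cons, ih]
      rw [PySem.Dict.getD_modify]
      by_cases hc : code = c
      · subst hc
        by_cases hs : code ∈ s' <;>
          simp [hs]
      · by_cases hs : code ∈ s' <;> simp [hs, hc]

-- the outer loop over enumerate(player_sets, i)
theorem build_masks_aux (code : String) (ps : List (List String)) :
    ∀ (i : Int), 0 ≤ i → ∀ d : PySem.Dict String Nat,
      ((PySem.List.enumerate ps i).foldl
          (fun d p => p.2.foldl (fun d c => d.modify c 0 (· ||| (1 <<< p.1.toNat))) d) d).getD code 0
        = d.getD code 0 ||| 2 ^ i.toNat * pvMaskLow code ps := by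
  induction ps with
  | nil => intro i hi d; simp [PySem.List.enumerate_nil, pvMaskLow]
  | cons s rest ih =>
      intro i hi d
      rw [PySem.List.enumerate_cons, List.foldl_cons, ih (i + 1) (by omega)]
      rw [inner_fold_getD]
      have hiN : (i + 1).toNat = i.toNat + 1 := by omega
      have hpow : (2 : Nat) ^ (i + 1).toNat = 2 ^ i.toNat * 2 := by rw [hiN]; ring
      have hshift : (1 : Nat) <<< i.toNat = 2 ^ i.toNat := by
        rw [Nat.shiftLeft_eq, one_mul]
      show (if code ∈ s then d.getD code 0 ||| 1 <<< i.toNat else d.getD code 0) |||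
          2 ^ (i + 1).toNat * pvMaskLow code rest = _
      by_cases hs : code ∈ s
      · simp only [hs, if_pos, pvMaskLow, hpow, hshift, Nat.bit_val, decide_true,
          Bool.toNat_true]
        rw [Nat.lor_assoc]
        congr 1
        have h1 : (2:Nat) ^ i.toNat = 2 ^ i.toNat * 1 := by ring
        calc 2 ^ i.toNat ||| 2 ^ i.toNat * 2 * pvMaskLow code rest
            = 2 ^ i.toNat * 1 ||| 2 ^ i.toNat * (2 * pvMaskLow code rest) := by
              rw [← h1]; ring_nf
          _ = 2 ^ i.toNat * (1 ||| 2 * pvMaskLow code rest) := pow_mul_lor _ _ _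
          _ = 2 ^ i.toNat * (2 * pvMaskLow code rest + 1) := by rw [one_lor_two_mul]
      · simp only [hs, if_false, pvMaskLow, hpow, Nat.bit_val, decide_false,
          Bool.toNat_false, Nat.add_zero]
        ring_nf

theorem getD_build_masks (code : String) (ps : List (List String)) :
    (pvBuildMasks ps).getD code 0 = pvMaskLow code ps := by
  have := build_masks_aux code ps 0 le_rfl PySem.Dict.empty
  simpa [pvBuildMasks, PySem.List.enumerate] using this

theorem cell_eq (r c : String) (ps : List (List String)) :
    count_players_with_all_py ps (PySem.Set.ofList [r, c])
      = (pyPopcount ((pvBuildMasks ps).getD r 0 &&& (pvBuildMasks ps).getD c 0) : Int) := by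
  rw [count_players_with_all_py, PySem.List.foldl_ite_add_one, zero_add,
    getD_build_masks, getD_build_masks, pyPopcount_land_maskLow]
  congr 1
  apply List.countP_congr
  intro s _
  simp only [decide_eq_true_eq, PySem.Set.issubset_iff, Bool.and_eq_true]
  constructor
  · intro h
    exact ⟨of_decide_eq_true (decide_eq_true (h r (by simp [PySem.Set.mem_ofList]))),
           of_decide_eq_true (decide_eq_true (h c (by simp [PySem.Set.mem_ofList])))⟩
  · rintro ⟨h1, h2⟩ x hx
    rw [PySem.Set.mem_ofList] at hx
    simp only [List.mem_cons, List.not_mem_nil, or_false] at hx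
    rcases hx with rfl | rfl <;> assumption

-- ===== VERDICT (by name: the statement is the Claim_ definition above) =====
theorem build_grid_counts_py_spec : Claim_equal_build_grid_counts_py := by
  intro rows cols ps _
  unfold Spec_build_grid_counts_py build_grid_counts_py build_grid_counts_py_alt
  simp only [List.map_map]
  apply List.map_congr_left
  intro r _
  apply List.map_congr_left
  intro c _
  exact cell_eq r c ps
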